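-- pv_equiv track=rewrite | github.com/thanatadcs/automated-clean-code | src/automated_clean_code/exercise_20_histlib.py | find_max_min_keys
-- ===== SOURCE A (Python) =====
-- from typing import Dict, List, Tuple
--
-- def find_max_min_keys(counter: Dict[str, int]) -> Tuple[int, str, int, str]:
--     """
--
--     Do something.
--
--     Return: something
--
--     """
--     max_key, min_key = None, None
--     max_counter, min_counter = 0, 0
--     for k, v in counter.items():
--         if max_key is None or v > max_counter:
--             max_key = k
--             max_counter = v
--         if min_key is None or v < min_counter:
--             min_key = k
--             min_counter = v
--     return max_counter, max_key, min_counter, min_key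
-- ===== SOURCE B (Python) =====
-- def find_max_min_keys(counter):
--     if not counter:
--         return 0, None, 0, None
--     items = list(counter.items())
--     asc = sorted(items, key=lambda kv: kv[1])
--     desc = sorted(items, key=lambda kv: -kv[1])
--     min_key, min_val = asc[0]
--     max_key, max_val = desc[0]
--     return max_val, max_key, min_val, min_key
-- ===== Notes on version B (the rewrite author's own statement) =====
-- stated objective: alternative
-- what changed: Replaced A's fused single-pass four-variable scan by sort-then-pick: stable-sort the items by value (and by negated value for the max) and take the first element of each sorted list, stability reproducing A's first-wins tie-break.
import Mathlib
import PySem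

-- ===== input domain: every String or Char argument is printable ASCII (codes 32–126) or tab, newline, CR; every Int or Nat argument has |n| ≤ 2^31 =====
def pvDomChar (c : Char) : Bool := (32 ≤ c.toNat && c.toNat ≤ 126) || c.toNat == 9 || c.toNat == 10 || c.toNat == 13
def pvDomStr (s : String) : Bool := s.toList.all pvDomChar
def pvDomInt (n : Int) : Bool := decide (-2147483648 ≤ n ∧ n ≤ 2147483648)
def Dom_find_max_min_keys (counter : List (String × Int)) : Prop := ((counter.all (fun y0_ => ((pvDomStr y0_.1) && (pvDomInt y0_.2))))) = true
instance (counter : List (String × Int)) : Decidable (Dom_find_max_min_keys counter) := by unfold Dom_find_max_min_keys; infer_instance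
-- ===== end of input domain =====

-- B replaces A's fused four-variable scan by stable sort-then-pick: sort the items by value
-- (ascending, and by negated value for the max) and take the first element of each — stability
-- reproduces A's first-wins tie-break (objective: alternative, not faster).

-- ===== PORT A =====
-- state: (max_key, min_key, max_counter, min_counter)
def findStepA (s : Option String × Option String × Int × Int) (kv : String × Int) :
    Option String × Option String × Int × Int :=
  let (maxKey, minKey, maxC, minC) := s
  let (maxKey, maxC) := if maxKey.isNone || kv.2 > maxC then (some kv.1, kv.2) else (maxKey, maxC)
  let (minKey, minC) := if minKey.isNone || kv.2 < minC then (some kv.1, kv.2) else (minKey, minC)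
  (maxKey, minKey, maxC, minC)

def find_max_min_keys (counter : List (String × Int)) : Int × Option String × Int × Option String :=
  let s := counter.foldl findStepA (none, none, 0, 0)
  (s.2.2.1, s.1, s.2.2.2, s.2.1)

-- ===== PORT B =====
def find_max_min_keys_alt (counter : List (String × Int)) : Int × Option String × Int × Option String :=
  match counter with
  | [] => (0, none, 0, none)
  | _ :: _ =>
    let asc := PySem.List.sorted counter (fun kv => kv.2)
    let desc := PySem.List.sorted counter (fun kv => (-kv.2 : Int))
    let mn := PySem.List.pyGetD asc 0 ("", 0)     -- asc[0]; in range: counter ≠ []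
    let mx := PySem.List.pyGetD desc 0 ("", 0)    -- desc[0]
    (mx.2, some mx.1, mn.2, some mn.1)

-- ===== PRECONDITION & SPEC =====
def Spec_find_max_min_keys (counter : List (String × Int)) (out : Int × Option String × Int × Option String) : Prop := out = find_max_min_keys_alt counter
instance (counter : List (String × Int)) (out : Int × Option String × Int × Option String) : Decidable (Spec_find_max_min_keys counter out) := by unfold Spec_find_max_min_keys; infer_instance

-- ===== CLAIM (what is proved, stated in full; the proofs are below) =====
def Claim_equal_find_max_min_keys : Prop := ∀ (counter : List (String × Int)), Dom_find_max_min_keys counter → Spec_find_max_min_keys counter (find_max_min_keys counter)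

-- ===== LEMMAS AND PROOFS =====
-- first-wins running min/max over pairs (shared characterisation of both programs)
def runBy (bef : (String × Int) → (String × Int) → Bool) (x : String × Int)
    (xs : List (String × Int)) : String × Int :=
  xs.foldl (fun best y => if bef y best then y else best) x

theorem insertBy_head? (bef : (String × Int) → (String × Int) → Bool) (x : String × Int)
    (ys : List (String × Int)) :
    (PySem.List.insertBy bef x ys).head? =
      some (match ys with | [] => x | y :: _ => if bef x y then x else y) := by
  cases ys with
  | nil => rfl
  | cons y t => simp only [PySem.List.insertBy]; split <;> simp

theorem foldl_insertBy_head? (bef : (String × Int) → (String × Int) → Bool)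
    (t acc : List (String × Int)) (h : String × Int) (hacc : acc.head? = some h) :
    (t.foldl (fun a x => PySem.List.insertBy bef x a) acc).head? = some (runBy bef h t) := by
  induction t generalizing acc h with
  | nil => simpa [runBy] using hacc
  | cons y rest ih =>
    cases acc with
    | nil => simp at hacc
    | cons a as =>
      obtain rfl : a = h := by simpa using hacc
      simp only [List.foldl_cons, runBy] at *
      exact ih _ _ (by simp [insertBy_head?])

theorem sorted_head? (key : (String × Int) → Int) (x : String × Int) (xs : List (String × Int)) :
    (PySem.List.sorted (x :: xs) key).head? =
      some (runBy (fun a b => decide (key a < key b)) x xs) := by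
  rw [PySem.List.sorted_eq_foldl_insertBy]
  exact foldl_insertBy_head? _ xs [x] x rfl

-- Once both keys are `some`, A's fold decouples into two first-wins reductions.
theorem foldA_decouple (l : List (String × Int)) (mk nk : String) (mc nc : Int) :
    l.foldl findStepA (some mk, some nk, mc, nc) =
      (some (runBy (fun a b => a.2 > b.2) (mk, mc) l).1,
        some (runBy (fun a b => a.2 < b.2) (nk, nc) l).1,
        (runBy (fun a b => a.2 > b.2) (mk, mc) l).2,
        (runBy (fun a b => a.2 < b.2) (nk, nc) l).2) := by
  induction l generalizing mk nk mc nc with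
  | nil => simp [runBy]
  | cons kv rest ih =>
    simp only [List.foldl_cons, runBy, findStepA] at *
    by_cases hmax : kv.2 > mc <;> by_cases hmin : kv.2 < nc <;>
      simp [hmax, hmin, ih]

theorem runBy_neg_key (x : String × Int) (xs : List (String × Int)) :
    runBy (fun a b => decide ((-a.2 : Int) < -b.2)) x xs = runBy (fun a b => a.2 > b.2) x xs := by
  simp only [runBy, neg_lt_neg_iff, gt_iff_lt]

-- ===== VERDICT (by name: the statement is the Claim_ definition above) =====
theorem find_max_min_keys_spec : Claim_equal_find_max_min_keys := by
  intro counter _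
  unfold Spec_find_max_min_keys
  cases counter with
  | nil => rfl
  | cons x xs =>
    have hasc := sorted_head? (fun kv => kv.2) x xs
    have hdesc := sorted_head? (fun kv => (-kv.2 : Int)) x xs
    simp only [find_max_min_keys, find_max_min_keys_alt, List.foldl_cons]
    have h1 : findStepA (none, none, 0, 0) x = (some x.1, some x.1, x.2, x.2) := by
      simp [findStepA]
    rw [h1, foldA_decouple]
    rw [runBy_neg_key] at hdesc
    cases hA : PySem.List.sorted (x :: xs) (fun kv => kv.2) with
    | nil => simp [hA] at hasc
    | cons m t =>
      cases hD : PySem.List.sorted (x :: xs) (fun kv => (-kv.2 : Int)) with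
      | nil => simp [hD] at hdesc
      | cons M T =>
        rw [hA] at hasc; rw [hD] at hdesc
        simp only [List.head?_cons, Option.some.injEq] at hasc hdesc
        simp [PySem.List.pyGetD_zero_cons, ← hasc, ← hdesc]
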